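-- pv_equiv track=rewrite | github.com/baditaflorin/ServerClaw | scripts/docker_publication_assurance.py | _flatten_binding_map
-- ===== SOURCE A (Python) =====
-- from typing import Any, Callable, Iterable
--
-- def _flatten_binding_map(port_map: dict[str, Any]) -> list[dict[str, str]]:
--     flattened: list[dict[str, str]] = []
--     seen: set[tuple[str, str]] = set()
--     if not isinstance(port_map, dict):
--         return flattened
--     for bindings in port_map.values():
--         if not isinstance(bindings, list):
--             continue
--         for binding in bindings:
--             if not isinstance(binding, dict):
--                 continue
--             host_ip = str(binding.get("HostIp", ""))
--             host_port = str(binding.get("HostPort", ""))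
--             key = (host_ip, host_port)
--             if key in seen:
--                 continue
--             seen.add(key)
--             flattened.append({"host_ip": host_ip, "host_port": host_port})
--     return flattened
-- ===== SOURCE B (Python) =====
-- def _flatten_binding_map(port_map):
--     if not isinstance(port_map, dict):
--         return []
--     pairs = [(str(b.get("HostIp", "")), str(b.get("HostPort", "")))
--              for bindings in port_map.values()
--              if isinstance(bindings, list)
--              for b in bindings
--              if isinstance(b, dict)]
--     # sieve dedup: repeatedly take the first remaining pair and erase all
--     # of its later duplicates from the worklist (no auxiliary seen-set)
--     out = []
--     while pairs:
--         head = pairs[0]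
--         out.append({"host_ip": head[0], "host_port": head[1]})
--         pairs = [p for p in pairs[1:] if p != head]
--     return out
-- ===== Notes on version B (the rewrite author's own statement) =====
-- stated objective: alternative
-- what changed: Replaces A's single nested loop with inline seen-set dedup by a flatten pass followed by a sieve: repeatedly emit the first remaining pair and filter all of its duplicates out of the remaining worklist, so no seen-set exists at all.
import Mathlib
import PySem

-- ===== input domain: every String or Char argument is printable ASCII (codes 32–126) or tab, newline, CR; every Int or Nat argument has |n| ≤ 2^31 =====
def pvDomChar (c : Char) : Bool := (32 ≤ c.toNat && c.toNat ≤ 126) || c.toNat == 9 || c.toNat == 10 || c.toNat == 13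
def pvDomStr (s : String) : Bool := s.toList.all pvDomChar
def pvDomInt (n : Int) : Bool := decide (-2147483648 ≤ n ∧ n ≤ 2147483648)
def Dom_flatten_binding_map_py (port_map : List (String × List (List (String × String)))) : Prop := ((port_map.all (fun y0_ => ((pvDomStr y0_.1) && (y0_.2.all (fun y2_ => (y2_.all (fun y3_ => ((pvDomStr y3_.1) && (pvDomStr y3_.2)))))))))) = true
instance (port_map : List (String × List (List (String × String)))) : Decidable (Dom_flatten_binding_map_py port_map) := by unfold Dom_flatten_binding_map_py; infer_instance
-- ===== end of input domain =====

-- B flattens all (HostIp, HostPort) pairs first, then deduplicates with a sieve loop that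
-- repeatedly emits the first remaining pair and filters its duplicates out of the worklist —
-- no seen-set is maintained at all (objective: alternative).
-- In this typed port every isinstance check of the Python is true by construction.

-- ===== PORT A =====
-- one iteration of A's inner loop body (binding is a dict; the isinstance check holds by type)
def pvStepA (st : List (List (String × String)) × PySem.Set (String × String))
    (binding : List (String × String)) :
    List (List (String × String)) × PySem.Set (String × String) :=
  let host_ip := PySem.Dict.getD (PySem.Dict.mk binding) "HostIp" ""
  let host_port := PySem.Dict.getD (PySem.Dict.mk binding) "HostPort" ""
  let key := (host_ip, host_port)
  if PySem.Set.contains st.2 key then st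
  else (st.1 ++ [[("host_ip", host_ip), ("host_port", host_port)]], PySem.Set.add st.2 key)

def flatten_binding_map_py (port_map : List (String × List (List (String × String)))) : List (List (String × String)) :=
  (port_map.foldl (fun st kv => kv.2.foldl pvStepA st) ([], PySem.Set.empty)).1

-- ===== PORT B =====
def pvPairOf (b : List (String × String)) : String × String :=
  (PySem.Dict.getD (PySem.Dict.mk b) "HostIp" "", PySem.Dict.getD (PySem.Dict.mk b) "HostPort" "")

-- B's while loop: emit the head, then filter its duplicates out of the rest
def pvSieve : List (String × String) → List (List (String × String))
  | [] => []
  | h :: t =>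
      [("host_ip", h.1), ("host_port", h.2)] ::
        pvSieve (t.filter (fun p => p != h))
termination_by l => l.length
decreasing_by
  simp only [List.length_unattach]
  exact Nat.lt_succ_of_le (le_trans (List.length_filter_le _ _) (by simp))

def flatten_binding_map_py_alt (port_map : List (String × List (List (String × String)))) : List (List (String × String)) :=
  pvSieve (port_map.flatMap (fun kv => kv.2.map pvPairOf))

-- ===== PRECONDITION & SPEC =====
def Spec_flatten_binding_map_py (port_map : List (String × List (List (String × String)))) (out : List (List (String × String))) : Prop := out = flatten_binding_map_py_alt port_map
instance (port_map : List (String × List (List (String × String)))) (out : List (List (String × String))) : Decidable (Spec_flatten_binding_map_py port_map out) := by unfold Spec_flatten_binding_map_py; infer_instance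

-- ===== CLAIM (what is proved, stated in full; the proofs are below) =====
def Claim_equal_flatten_binding_map_py : Prop := ∀ (port_map : List (String × List (List (String × String)))), Dom_flatten_binding_map_py port_map → Spec_flatten_binding_map_py port_map (flatten_binding_map_py port_map)

-- ===== LEMMAS AND PROOFS =====

-- A's step, expressed on the key pair it computes
def pvStepP (st : List (List (String × String)) × PySem.Set (String × String))
    (p : String × String) :
    List (List (String × String)) × PySem.Set (String × String) :=
  if PySem.Set.contains st.2 p then st
  else (st.1 ++ [[("host_ip", p.1), ("host_port", p.2)]], PySem.Set.add st.2 p)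

lemma pvStepA_eq (st : List (List (String × String)) × PySem.Set (String × String))
    (b : List (String × String)) : pvStepA st b = pvStepP st (pvPairOf b) := rfl

lemma pvInner_eq (bindings : List (List (String × String)))
    (st : List (List (String × String)) × PySem.Set (String × String)) :
    bindings.foldl pvStepA st = (bindings.map pvPairOf).foldl pvStepP st := by
  rw [List.foldl_map]
  have h : pvStepA = fun st b => pvStepP st (pvPairOf b) :=
    funext fun st => funext fun b => pvStepA_eq st b
  rw [h]

lemma pvOuter_eq (pm : List (String × List (List (String × String))))
    (st : List (List (String × String)) × PySem.Set (String × String)) :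
    pm.foldl (fun st kv => kv.2.foldl pvStepA st) st =
      (pm.flatMap (fun kv => kv.2.map pvPairOf)).foldl pvStepP st := by
  induction pm generalizing st with
  | nil => rfl
  | cons kv pm ih =>
    simp only [List.foldl_cons, List.flatMap_cons, List.foldl_append]
    rw [pvInner_eq, ih]

-- the two defining equations of the sieve
lemma pvSieve_nil : pvSieve [] = [] := by rw [pvSieve.eq_def]

lemma pvSieve_cons (h : String × String) (t : List (String × String)) :
    pvSieve (h :: t) =
      [("host_ip", h.1), ("host_port", h.2)] :: pvSieve (t.filter (fun p => p != h)) := by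
  rw [pvSieve.eq_def]

-- A's fold with a seen-set equals the sieve on the not-yet-seen pairs
lemma pvFoldP_sieve (ps : List (String × String))
    (acc : List (List (String × String))) (seen : PySem.Set (String × String)) :
    (ps.foldl pvStepP (acc, seen)).1 =
      acc ++ pvSieve (ps.filter (fun p => !(PySem.Set.contains seen p))) := by
  induction hl : ps.length using Nat.strong_induction_on generalizing ps acc seen with
  | _ n ih =>
    cases ps with
    | nil => simp [pvSieve_nil]
    | cons h t =>
      have hlt : t.length < n := by simp [← hl]
      simp only [List.foldl_cons, List.filter_cons]
      by_cases hm : PySem.Set.contains seen h = true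
      · have hmem : h ∈ seen := by simpa [PySem.Set.contains] using hm
        have hstep : pvStepP (acc, seen) h = (acc, seen) := by
          simp [pvStepP, PySem.Set.contains, hmem]
        rw [hstep, hm]
        simpa using ih t.length hlt t acc seen rfl
      · have hm' : PySem.Set.contains seen h = false := by simpa using hm
        have hmem : h ∉ seen := by simpa [PySem.Set.contains] using hm'
        have hstep : pvStepP (acc, seen) h =
            (acc ++ [[("host_ip", h.1), ("host_port", h.2)]], PySem.Set.add seen h) := by
          simp [pvStepP, PySem.Set.contains, hmem]
        rw [hstep, hm']
        simp only [Bool.not_false]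
        rw [ih t.length hlt t _ _ rfl]
        have hadd : PySem.Set.add seen h = seen ++ [h] := by
          simp [PySem.Set.add, PySem.Set.contains, hmem]
        have hfilt : t.filter (fun p => !(PySem.Set.contains (PySem.Set.add seen h) p)) =
            (t.filter (fun p => !(PySem.Set.contains seen p))).filter (fun p => p != h) := by
          rw [List.filter_filter]
          apply List.filter_congr
          intro p _
          by_cases h1 : p = h <;> by_cases h2 : p ∈ seen <;>
            simp [hadd, PySem.Set.contains, h1, h2]
        rw [hfilt]
        simp only [if_pos trivial, pvSieve_cons]
        simp

-- ===== VERDICT (by name: the statement is the Claim_ definition above) =====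
theorem flatten_binding_map_py_spec : Claim_equal_flatten_binding_map_py := by
  intro pm _
  show flatten_binding_map_py pm = flatten_binding_map_py_alt pm
  unfold flatten_binding_map_py flatten_binding_map_py_alt
  rw [pvOuter_eq, pvFoldP_sieve]
  simp [PySem.Set.empty, PySem.Set.contains]
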